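-- pv_equiv track=rewrite | github.com/rrshidev/Generation-Python_advanced-course- | 4-6-6.py | fill_matrix
-- ===== SOURCE A (Python) =====
-- def fill_matrix(n):
--     matrix = []
--     for r in range(n):
--         nums = []
--         for c in range(n):
--             if r == c or n == r + c + 1 \
--                     or (r < c and r < n - 1 - c) \
--                     or (r > c and r > n - 1 - c):
--                 nums.append(1)
--             else:
--                 nums.append(0)
--         matrix.append(nums)
--
--     return matrix
-- ===== SOURCE B (Python) =====
-- def fill_matrix(n):
--     matrix = []
--     for r in range(n):
--         k = min(r, n - 1 - r)
--         matrix.append([0] * k + [1] * (n - 2 * k) + [0] * k)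
--     return matrix
-- ===== Notes on version B (the rewrite author's own statement) =====
-- stated objective: simpler
-- what changed: Each row is built directly as k zeros, n-2k ones, k zeros with k = min(r, n-1-r), eliminating the inner per-column loop and the compound diagonal/triangle predicate.
import Mathlib
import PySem

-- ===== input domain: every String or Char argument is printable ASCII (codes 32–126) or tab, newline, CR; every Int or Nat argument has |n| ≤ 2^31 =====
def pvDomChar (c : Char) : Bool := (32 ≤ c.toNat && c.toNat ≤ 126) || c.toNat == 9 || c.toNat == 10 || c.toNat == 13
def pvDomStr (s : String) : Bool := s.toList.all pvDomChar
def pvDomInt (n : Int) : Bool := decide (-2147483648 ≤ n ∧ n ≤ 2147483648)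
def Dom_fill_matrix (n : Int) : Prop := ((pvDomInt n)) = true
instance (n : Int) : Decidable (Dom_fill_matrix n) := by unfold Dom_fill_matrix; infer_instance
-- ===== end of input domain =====

-- B builds each row directly as k zeros, n-2k ones, k zeros (k = min(r, n-1-r)),
-- removing A's inner per-column loop and its compound predicate.

-- ===== PORT A =====
def fill_matrix (n : Int) : List (List Int) :=
  (PySem.List.pyRange 0 n 1).foldl (fun matrix r =>
    matrix ++ [(PySem.List.pyRange 0 n 1).foldl (fun nums c =>
      if r = c ∨ n = r + c + 1 ∨ (r < c ∧ r < n - 1 - c) ∨ (r > c ∧ r > n - 1 - c)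
      then nums ++ [(1 : Int)]
      else nums ++ [(0 : Int)]) []]) []

-- ===== PORT B =====
-- '[0]*k' is List.replicate k.toNat 0 (Python list repetition clamps negative counts to empty, as toNat does)
def fill_matrix_alt (n : Int) : List (List Int) :=
  (PySem.List.pyRange 0 n 1).foldl (fun matrix r =>
    let k := min r (n - 1 - r)
    matrix ++ [List.replicate k.toNat (0 : Int) ++
               List.replicate (n - 2 * k).toNat (1 : Int) ++
               List.replicate k.toNat (0 : Int)]) []

-- ===== PRECONDITION & SPEC =====
def Spec_fill_matrix (n : Int) (out : List (List Int)) : Prop := out = fill_matrix_alt n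
instance (n : Int) (out : List (List Int)) : Decidable (Spec_fill_matrix n out) := by unfold Spec_fill_matrix; infer_instance

-- ===== CLAIM (what is proved, stated in full; the proofs are below) =====
def Claim_equal_fill_matrix : Prop := ∀ (n : Int), Dom_fill_matrix n → Spec_fill_matrix n (fill_matrix n)

-- ===== LEMMAS AND PROOFS =====

-- a map whose value is constant on the list is a replicate
theorem pv_map_const (l : List Int) (f : Int → Int) (c : Int)
    (h : ∀ x ∈ l, f x = c) : l.map f = List.replicate l.length c := by
  rw [List.map_congr_left h]
  simp

-- a constant-valued map over an integer range is an explicit replicate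
theorem pv_map_range_const (a b c : Int) (f : Int → Int)
    (h : ∀ x, a ≤ x → x < b → f x = c) :
    (PySem.List.pyRange a b 1).map f = List.replicate (b - a).toNat c := by
  rw [pv_map_const _ _ c (fun x hx => by
    rcases (PySem.List.mem_pyRange_one).1 hx with ⟨h1, h2⟩
    exact h x h1 h2)]
  rw [PySem.List.length_pyRange_one]

-- A's row (per-cell predicate over the full range) equals B's run-built row
theorem pv_row_eq (n r : Int) (hr0 : 0 ≤ r) (hrn : r < n) :
    (PySem.List.pyRange 0 n 1).map (fun c =>
      if r = c ∨ n = r + c + 1 ∨ (r < c ∧ r < n - 1 - c) ∨ (r > c ∧ r > n - 1 - c)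
      then (1 : Int) else 0) =
    List.replicate (min r (n - 1 - r)).toNat (0 : Int) ++
    List.replicate (n - 2 * min r (n - 1 - r)).toNat (1 : Int) ++
    List.replicate (min r (n - 1 - r)).toNat (0 : Int) := by
  set k := min r (n - 1 - r) with hk
  have hk0 : 0 ≤ k := by omega
  have hkn : k ≤ n - k := by omega
  rw [PySem.List.pyRange_one_append 0 k n (by omega) (by omega),
      PySem.List.pyRange_one_append k (n - k) n (by omega) (by omega)]
  rw [List.map_append, List.map_append]
  rw [pv_map_range_const 0 k 0 _ (fun x h1 h2 => by rw [if_neg]; omega),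
      pv_map_range_const k (n - k) 1 _ (fun x h1 h2 => by rw [if_pos]; omega),
      pv_map_range_const (n - k) n 0 _ (fun x h1 h2 => by rw [if_neg]; omega)]
  have e1 : (k - 0).toNat = k.toNat := by omega
  have e2 : (n - k - k).toNat = (n - 2 * k).toNat := by omega
  have e3 : (n - (n - k)).toNat = k.toNat := by omega
  rw [e1, e2, e3, List.append_assoc]

-- ===== VERDICT (by name: the statement is the Claim_ definition above) =====
theorem fill_matrix_spec : Claim_equal_fill_matrix := by
  intro n _
  unfold Spec_fill_matrix fill_matrix fill_matrix_alt
  -- rewrite A's inner two-branch append as a single appended if-value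
  have hbody : ∀ r : Int,
      (PySem.List.pyRange 0 n 1).foldl (fun nums c =>
        if r = c ∨ n = r + c + 1 ∨ (r < c ∧ r < n - 1 - c) ∨ (r > c ∧ r > n - 1 - c)
        then nums ++ [(1 : Int)] else nums ++ [(0 : Int)]) [] =
      (PySem.List.pyRange 0 n 1).map (fun c =>
        if r = c ∨ n = r + c + 1 ∨ (r < c ∧ r < n - 1 - c) ∨ (r > c ∧ r > n - 1 - c)
        then (1 : Int) else 0) := by
    intro r
    have : (fun (nums : List Int) (c : Int) =>
        if r = c ∨ n = r + c + 1 ∨ (r < c ∧ r < n - 1 - c) ∨ (r > c ∧ r > n - 1 - c)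
        then nums ++ [(1 : Int)] else nums ++ [(0 : Int)]) =
        (fun nums c => nums ++ [if r = c ∨ n = r + c + 1 ∨ (r < c ∧ r < n - 1 - c) ∨ (r > c ∧ r > n - 1 - c)
        then (1 : Int) else 0]) := by
      funext nums c; split <;> rfl
    rw [this, PySem.List.foldl_append_singleton_eq_map, List.nil_append]
  apply PySem.List.foldl_congr_mem
  intro acc r hr
  rcases (PySem.List.mem_pyRange_one).1 hr with ⟨h1, h2⟩
  rw [hbody r, pv_row_eq n r h1 h2]
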